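-- pv_equiv track=rewrite | github.com/kazuma-naka/CSSD-1102-Group-Project | starter_code.py | sort_by_frequency
-- ===== SOURCE A (Python) =====
-- from collections import Counter
--
-- def sort_by_frequency(cids: list[int]) -> list[int]:
--     """
--     Sort the cids by frequency by descending order and remove duplicate items.
--
--     NOTE: Your implementation may result in a list with different orders as in the example below as you are free to handle ties in any way you want
--     In the autograder on PrairieLearn, we will NOT include examples with ties.
--
--     >>> sort_by_frequency([961, 22247451, 157350, 123332, 137349153, 5460554, 6914119, 17985087, 21871715, 22146520, 44144404, 57470146, 129631210, 171528, 20266850, 57422081, 72499223, 21338204, 23560202, 57418915, 57634601, 57937911, 58422532, 58609138, 58750500, 58828612, 59045931, 59049839, 59102850, 59367517, 59984341, 78060557, 85595863, 85602483, 139617572, 157621312, 158956564, 161115002, 163575618, 13644079, 15593902, 17769776, 19818716, 20037327, 71327550, 71333220])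
--     [57422081, 59102850, 58422532, 171528, 23560202, 78060557, 44144404, 158956564, 72499223, 22247451, 137349153, 57418915, 58750500, 139617572, 157350, 57634601, 59045931, 15593902, 13644079, 17769776, 85602483, 71327550, 17985087, 157621312, 961, 57470146, 163575618, 123332, 58828612, 6914119, 5460554, 20037327, 59984341, 85595863, 22146520, 21338204, 59367517, 19818716, 20266850, 21871715, 71333220, 129631210, 59049839, 58609138, 57937911, 161115002]
--     """
--     if not cids:
--         return []
--
--     counts = Counter(cids)
--
--     first_index: dict[int, int] = {}
--     for i, cid in enumerate(cids):
--         if cid not in first_index: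
--             first_index[cid] = i
--
--     unique_cids = list(counts.keys())
--
--     unique_cids.sort(key=lambda cid: (-counts[cid], first_index[cid]))
--
--     return unique_cids
-- ===== SOURCE B (Python) =====
-- from collections import Counter
--
-- def sort_by_frequency(cids: list[int]) -> list[int]:
--     # Counting/bucket sort by frequency: O(n), no comparison sort.
--     counts = Counter(cids)
--     if not counts:
--         return []
--     maxc = max(counts.values())
--     buckets = [[] for _ in range(maxc + 1)]
--     seen = set()
--     for cid in cids:
--         if cid not in seen:
--             seen.add(cid)
--             buckets[counts[cid]].append(cid)
--     result = []
--     for c in range(maxc, 0, -1):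
--         result.extend(buckets[c])
--     return result
-- ===== Notes on version B (the rewrite author's own statement) =====
-- stated objective: alternative
-- what changed: Replaces the comparison sort on the (-count, first_index) tuple key by a counting/bucket sort: one pass over cids with a seen-set drops each unique cid into the bucket of its frequency (keeping first-occurrence order), and the buckets are concatenated from the highest count down.
import Mathlib
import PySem

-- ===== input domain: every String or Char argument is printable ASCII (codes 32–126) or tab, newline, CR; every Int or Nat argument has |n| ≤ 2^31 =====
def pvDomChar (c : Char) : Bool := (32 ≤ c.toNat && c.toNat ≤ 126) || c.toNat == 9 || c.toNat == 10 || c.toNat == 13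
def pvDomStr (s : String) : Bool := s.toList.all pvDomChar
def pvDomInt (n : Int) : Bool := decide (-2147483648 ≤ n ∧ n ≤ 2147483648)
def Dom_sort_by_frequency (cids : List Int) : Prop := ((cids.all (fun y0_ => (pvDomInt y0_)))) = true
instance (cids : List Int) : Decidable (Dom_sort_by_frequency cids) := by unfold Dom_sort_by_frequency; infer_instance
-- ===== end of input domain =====

-- B replaces A's comparison sort on the (-count, first_index) key by a one-pass counting/bucket
-- sort by frequency (buckets walked from the highest count down); same return value everywhere.

-- ===== PORT A =====
def sort_by_frequency (cids : List Int) : List Int :=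
  if cids = [] then []
  else
    let counts := PySem.Dict.counter cids
    let first_index := (PySem.List.enumerate cids).foldl
      (fun d p => if !d.contains p.2 then d.insert p.2 p.1 else d)
      (PySem.Dict.empty : PySem.Dict Int Int)
    let unique_cids := counts.keys
    -- counts[cid] / first_index[cid]: every unique cid is a key of both dicts, so getD is exact
    PySem.List.sorted2 unique_cids
      (fun cid => -(counts.getD cid 0)) (fun cid => first_index.getD cid 0) false

-- ===== PORT B =====
def sort_by_frequency_alt (cids : List Int) : List Int :=
  let counts := PySem.Dict.counter cids
  if counts.keys = [] then []          -- 'if not counts'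
  else
    -- counts is nonempty here, so max? is some and the getD default is never used
    let maxc := (PySem.List.max? counts.values (fun v => v)).getD 0
    -- maxc ≥ 1 here, so the Nat-side sizes/indices below are exact
    let init : List (List Int) := List.replicate (maxc + 1).toNat []
    let st := cids.foldl
      (fun (st : List (List Int) × PySem.Set Int) cid =>
        if !(st.2.contains cid) then
          (st.1.set (counts.getD cid 0).toNat
             (st.1.getD (counts.getD cid 0).toNat [] ++ [cid]),
           st.2.add cid)
        else st)
      (init, (PySem.Set.empty : PySem.Set Int))
    (PySem.List.pyRange maxc 0 (-1)).foldl
      (fun acc c => acc ++ PySem.List.pyGetD st.1 c []) []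

-- ===== PRECONDITION & SPEC =====
def Spec_sort_by_frequency (cids : List Int) (out : List Int) : Prop := out = sort_by_frequency_alt cids
instance (cids : List Int) (out : List Int) : Decidable (Spec_sort_by_frequency cids out) := by unfold Spec_sort_by_frequency; infer_instance

-- ===== CLAIM (what is proved, stated in full; the proofs are below) =====
def Claim_equal_sort_by_frequency : Prop := ∀ (cids : List Int), Dom_sort_by_frequency cids → Spec_sort_by_frequency cids (sort_by_frequency cids)

-- ===== LEMMAS AND PROOFS =====

theorem pv_sorted2_eq_sorted_toLex (xs : List Int) (k1 k2 : Int → Int) :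
    PySem.List.sorted2 xs k1 k2 false
      = PySem.List.sorted xs (fun x => toLex (k1 x, k2 x)) false := by
  simp only [PySem.List.sorted2, PySem.List.sorted]
  congr 1
  funext acc x
  congr 1
  funext a b
  by_cases h1 : k1 a < k1 b <;> by_cases h2 : k1 b < k1 a <;> by_cases h3 : k2 a < k2 b <;>
    simp [h1, h2, h3, Prod.Lex.lt_iff] <;> omega

theorem pv_idxOf?_of_mem (l : List Int) (x : Int) (h : x ∈ l) :
    List.idxOf? x l = some (List.idxOf x l) := by
  induction l with
  | nil => simp at h
  | cons a t ih =>
    by_cases hxa : a = x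
    · subst hxa; simp [List.idxOf?_cons, List.idxOf_cons_self]
    · have hx : x ∈ t := by simpa [Ne.symm hxa] using h
      simp [List.idxOf?_cons, List.idxOf_cons_ne _ (Ne.symm hxa), beq_iff_eq, hxa, ih hx]

theorem pv_contains_add (s : PySem.Set Int) (a x : Int) :
    (s.add a).contains x = (s.contains x || x == a) := by
  by_cases h : s.contains x = true
  · simp [PySem.Set.add, h]; split <;> simp_all [PySem.Set.contains]
  · simp [PySem.Set.add]; split <;> rename_i hc
    · simp [h, beq_iff_eq]
      intro hx; subst hx; simp_all [PySem.Set.contains]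
    · simp [PySem.Set.contains] at *
      simp [h]
      by_cases hxa : x = a <;> simp [hxa]

theorem pv_fi_get (l : List Int) (i0 : Int) (d : PySem.Dict Int Int) (x : Int) :
    ((PySem.List.enumerate l i0).foldl
        (fun d p => if !d.contains p.2 then d.insert p.2 p.1 else d) d).get? x
      = (match d.get? x with
          | some v => some v
          | none => (PySem.List.index? l x).map (fun k => i0 + (k : Int))) := by
  induction l generalizing i0 d with
  | nil =>
    show d.get? x = _
    cases hg : d.get? x
    · simp only [hg]
      rw [PySem.List.index?_eq_idxOf?]
      simp
    · simp [hg]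
  | cons a t ih =>
    rw [PySem.List.enumerate_cons]
    simp only [List.foldl_cons]
    by_cases hc : d.contains a = true
    · rw [if_neg (by simp [hc])]
      rw [ih]
      by_cases hxa : x = a
      · subst hxa
        have hs : (d.get? x).isSome := by rw [← PySem.Dict.contains_eq_isSome_get?]; exact hc
        obtain ⟨v, hv⟩ := Option.isSome_iff_exists.mp hs
        simp only [hv]
      · rw [PySem.List.index?_cons_of_ne t (Ne.symm hxa)]
        cases hg : d.get? x <;> simp only [hg]
        cases hi : PySem.List.index? t x <;> simp [hi] <;> push_cast <;> ring
    · rw [if_pos (by simp [hc])]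
      rw [ih]
      by_cases hxa : x = a
      · subst hxa
        have hg : d.get? x = none := by
          cases hgx : d.get? x
          · rfl
          · exfalso; exact hc (by rw [PySem.Dict.contains_eq_isSome_get?, hgx]; rfl)
        simp only [hg]
        rw [PySem.Dict.get?_insert_self]
        rw [PySem.List.index?_cons_self]
        simp
      · rw [PySem.Dict.get?_insert_of_ne _ _ hxa]
        rw [PySem.List.index?_cons_of_ne t (Ne.symm hxa)]
        cases hg : d.get? x <;> simp only [hg]
        cases hi : PySem.List.index? t x <;> simp [hi] <;> push_cast <;> ring

theorem pv_fi_getD (cids : List Int) (x : Int) (hx : x ∈ cids) :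
    ((PySem.List.enumerate cids 0).foldl
        (fun d p => if !d.contains p.2 then d.insert p.2 p.1 else d)
        (PySem.Dict.empty : PySem.Dict Int Int)).getD x 0
      = (List.idxOf x cids : Int) := by
  show (_ : PySem.Dict Int Int).getD x 0 = _
  rw [PySem.Dict.getD]
  rw [pv_fi_get]
  rw [PySem.Dict.get?_empty]
  rw [PySem.List.index?_eq_idxOf?, pv_idxOf?_of_mem _ _ hx]
  simp

theorem pv_ofList_pairwise_idxOf (xs : List Int) :
    (PySem.Set.ofList xs).Pairwise (fun a b => List.idxOf a xs < List.idxOf b xs) := by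
  induction xs with
  | nil => simp [PySem.Set.ofList_nil]
  | cons x t ih =>
    rw [PySem.Set.ofList_cons]
    constructor
    · intro b hb
      obtain ⟨hbt, hbx⟩ := (PySem.Set.mem_discard _ _ _).1 hb
      rw [List.idxOf_cons_self, List.idxOf_cons_ne _ (Ne.symm hbx)]
      omega
    · have hsub : ((PySem.Set.ofList t).discard x).Sublist (PySem.Set.ofList t) := by
        simpa [PySem.Set.discard] using (List.filter_sublist (l := PySem.Set.ofList t))
      refine (ih.sublist hsub).imp_of_mem ?_
      intro a b ha hb hab
      obtain ⟨_, hax⟩ := (PySem.Set.mem_discard _ _ _).1 ha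
      obtain ⟨_, hbx⟩ := (PySem.Set.mem_discard _ _ _).1 hb
      rw [List.idxOf_cons_ne _ (Ne.symm hax), List.idxOf_cons_ne _ (Ne.symm hbx)]
      omega

theorem pv_ofList_filter (p : Int → Bool) (xs : List Int) :
    PySem.Set.ofList (xs.filter p) = (PySem.Set.ofList xs).filter p := by
  induction xs with
  | nil => simp [PySem.Set.ofList_nil]
  | cons x t ih =>
    by_cases hp : p x = true
    · rw [List.filter_cons_of_pos hp, PySem.Set.ofList_cons, PySem.Set.ofList_cons,
          List.filter_cons_of_pos hp, ih]
      simp only [PySem.Set.discard, List.filter_filter]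
      exact congrArg _ (List.filter_congr (fun a _ => Bool.and_comm _ _))
    · rw [List.filter_cons_of_neg hp, PySem.Set.ofList_cons, List.filter_cons_of_neg hp, ih]
      simp only [PySem.Set.discard, List.filter_filter]
      have hpx : p x = false := by simpa using hp
      refine List.filter_congr (fun a _ => ?_)
      by_cases hax : a = x
      · subst hax; simp [hpx]
      · simp [hax]

theorem pv_flatMap_filter_perm (cs : List Int) : ∀ (l : List Int) (f : Int → Int),
    cs.Nodup → (∀ x ∈ l, f x ∈ cs) →
    (cs.flatMap (fun c => l.filter (fun x => f x == c))).Perm l := by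
  induction cs with
  | nil =>
    intro l f _ hmem
    cases l with
    | nil => simp
    | cons a t => exact absurd (hmem a (by simp)) (by simp)
  | cons c cs ih =>
    intro l f hn hmem
    rw [List.flatMap_cons]
    have hcs : c ∉ cs := (List.nodup_cons.mp hn).1
    have hcongr : ∀ c' ∈ cs,
        l.filter (fun x => f x == c') = (l.filter (fun x => !(f x == c))).filter (fun x => f x == c') := by
      intro c' hc'
      rw [List.filter_filter]
      refine List.filter_congr (fun x _ => ?_)
      by_cases h : f x = c'
      · have hcc : ¬ c' = c := fun hh => hcs (hh ▸ hc')
        simp [h, hcc]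
      · simp [h]
    rw [List.flatMap_congr hcongr]
    have hperm := ih (l.filter (fun x => !(f x == c))) f (List.nodup_cons.mp hn).2 ?_
    · exact ((hperm.append_left (l.filter (fun x => f x == c))).trans (List.filter_append_perm _ l))
    · intro x hx
      have hxl := List.mem_of_mem_filter hx
      have hne : ¬ (f x == c) = true := by
        have := List.of_mem_filter hx; simpa using this
      have := hmem x hxl
      simp only [List.mem_cons] at this
      rcases this with h | h
      · exact absurd (by simp [h]) hne
      · exact h

theorem pv_mem_descRange (m c : Int) : c ∈ PySem.List.pyRange m 0 (-1) ↔ 1 ≤ c ∧ c ≤ m := by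
  rw [PySem.List.pyRange_neg_one_eq_reverse]
  rw [List.mem_reverse]
  rw [PySem.List.mem_pyRange_one]
  omega

theorem pv_descRange_pairwise (m : Int) :
    (PySem.List.pyRange m 0 (-1)).Pairwise (fun a b => b < a) := by
  rw [PySem.List.pyRange_neg_one_eq_reverse]
  rw [List.pairwise_reverse]
  rw [PySem.List.pyRange_one]
  rw [List.pairwise_map]
  exact List.pairwise_lt_range.imp (by omega)

theorem pv_bucket_fold (f : Int → Nat) (l : List Int) (B : List (List Int))
    (s : PySem.Set Int) (j : Nat) (hr : ∀ x ∈ l, f x < B.length) :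
    ((l.foldl (fun st cid => if !(st.2.contains cid) then
          (st.1.set (f cid) (st.1.getD (f cid) [] ++ [cid]), st.2.add cid) else st)
        (B, s)).1).getD j []
      = B.getD j []
        ++ (PySem.Set.ofList (l.filter (fun x => !(s.contains x)))).filter
             (fun x => f x == j) := by
  induction l generalizing B s with
  | nil => simp [PySem.Set.ofList_nil]
  | cons a t ih =>
    simp only [List.foldl_cons]
    by_cases hc : s.contains a = true
    · rw [if_neg (by simpa [PySem.Set.contains] using hc)]
      rw [ih _ _ (fun x hx => hr x (by simp [hx]))]
      rw [List.filter_cons_of_neg (by simpa [PySem.Set.contains] using hc)]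
    · rw [if_pos (by simpa [PySem.Set.contains] using hc)]
      rw [List.filter_cons_of_pos (by simpa [PySem.Set.contains] using hc)]
      have hfa : f a < B.length := hr a (by simp)
      rw [ih _ _ (fun x hx => by rw [List.length_set]; exact hr x (by simp [hx]))]
      -- rewrite the seen-set filter on the left
      have hfilt : t.filter (fun x => !((s.add a).contains x))
          = (t.filter (fun x => !(s.contains x))).filter (fun x => !(x == a)) := by
        rw [List.filter_filter]
        refine List.filter_congr (fun x _ => ?_)
        rw [pv_contains_add]
        cases hxs : s.contains x <;> cases hxa : (x == a) <;> simp [hxs, hxa]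
      rw [hfilt, pv_ofList_filter, PySem.Set.ofList_cons]
      set Z := PySem.Set.ofList (t.filter (fun x => !(s.contains x))) with hZ
      rw [show (Z.filter fun x => !(x == a)) = Z.discard a from rfl]
      rw [List.filter_cons]
      by_cases hj : f a = j
      · subst hj
        rw [if_pos (by simp)]
        rw [List.getD_eq_getElem?_getD, List.getElem?_set_self hfa,
            List.getD_eq_getElem?_getD]
        simp [List.append_assoc]
      · rw [if_neg (by simp [hj])]
        rw [List.getD_eq_getElem?_getD, List.getElem?_set_ne (by omega),
            ← List.getD_eq_getElem?_getD]

theorem pv_main (cids : List Int) : sort_by_frequency cids = sort_by_frequency_alt cids := by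
  by_cases hnil : cids = []
  · subst hnil; rfl
  · -- notation
    have hkeys : (PySem.Dict.counter cids).keys = PySem.Set.ofList cids :=
      PySem.Dict.keys_counter cids
    have hkeysne : (PySem.Dict.counter cids).keys ≠ [] := by
      rw [hkeys]
      cases cids with
      | nil => exact absurd rfl hnil
      | cons a t => rw [PySem.Set.ofList_cons]; simp
    -- values of the counter
    have hvals : (PySem.Dict.counter cids).values
        = (PySem.Set.ofList cids).map (fun k => ((cids.count k : Nat) : Int)) := by
      show ((PySem.Dict.counter cids).items).map _ = _
      rw [PySem.Dict.items_counter]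
      rw [List.map_map]
      rfl
    have hvalsne : (PySem.Dict.counter cids).values ≠ [] := by
      rw [hvals]
      cases cids with
      | nil => exact absurd rfl hnil
      | cons a t => rw [PySem.Set.ofList_cons]; simp
    obtain ⟨m, hm⟩ : ∃ m, PySem.List.max? (PySem.Dict.counter cids).values (fun v => v) = some m := by
      cases hq : PySem.List.max? (PySem.Dict.counter cids).values (fun v => v)
      · exact absurd ((PySem.List.max?_eq_none_iff _ _).mp hq) hvalsne
      · exact ⟨_, rfl⟩
    have hub : ∀ x ∈ cids, (cids.count x : Int) ≤ m := by
      intro x hx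
      refine PySem.List.max?_isMax hm _ ?_
      rw [hvals]
      exact List.mem_map_of_mem ((PySem.Set.mem_ofList cids x).2 hx)
    have hm1 : 1 ≤ m := by
      have hmem := PySem.List.max?_mem hm
      rw [hvals] at hmem
      obtain ⟨k, hk, hkm⟩ := List.mem_map.mp hmem
      have : k ∈ cids := (PySem.Set.mem_ofList cids k).1 hk
      have : 0 < cids.count k := List.count_pos_iff.2 this
      omega
    -- the common middle form
    set ys := (PySem.List.pyRange m 0 (-1)).flatMap
        (fun c => (PySem.Set.ofList cids).filter (fun x => ((cids.count x : Nat) : Int) == c)) with hys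
    -- ===== B side =====
    have hB : sort_by_frequency_alt cids = ys := by
      show (if (PySem.Dict.counter cids).keys = [] then [] else _) = ys
      rw [if_neg hkeysne]
      rw [hm]
      simp only [Option.getD_some]
      show (PySem.List.pyRange m 0 (-1)).foldl (fun acc c => acc ++ PySem.List.pyGetD _ c []) [] = ys
      rw [PySem.List.foldl_append_eq_flatMap]
      rw [List.nil_append]
      refine List.flatMap_congr ?_
      intro c hc
      obtain ⟨hc1, hcm⟩ := (pv_mem_descRange m c).1 hc
      rw [PySem.List.pyGetD_of_nonneg _ _ (by omega)]
      have hr : ∀ x ∈ cids, ((PySem.Dict.counter cids).getD x 0).toNat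
          < (List.replicate ((m : Int) + 1).toNat ([] : List Int)).length := by
        intro x hx
        rw [PySem.Dict.getD_counter, List.length_replicate]
        have := hub x hx
        omega
      rw [pv_bucket_fold (fun cid => ((PySem.Dict.counter cids).getD cid 0).toNat) cids _ _ _ hr]
      rw [List.getD_replicate _ (by have := hm1; omega)]
      rw [List.nil_append]
      have : cids.filter (fun x => !((PySem.Set.empty : PySem.Set Int).contains x)) = cids := by
        simp [PySem.Set.empty, PySem.Set.contains]
      rw [this]
      refine List.filter_congr ?_
      intro x hxu
      have hx : x ∈ cids := (PySem.Set.mem_ofList cids x).1 hxu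
      rw [PySem.Dict.getD_counter]
      rw [Int.toNat_natCast]
      by_cases h : (cids.count x : Int) = c
      · have h2 : cids.count x = c.toNat := by omega
        simp [h, h2]
        omega
      · have h2 : ¬ (cids.count x = c.toNat) := by omega
        simp [h, h2]
    -- ===== A side =====
    have hA : sort_by_frequency cids = ys := by
      show (if cids = [] then [] else _) = ys
      rw [if_neg hnil]
      rw [pv_sorted2_eq_sorted_toLex]
      rw [hkeys]
      refine PySem.List.sorted_eq_of_perm_of_pairwise_lt _ _ _ ?_ ?_
      · refine pv_flatMap_filter_perm _ _ (fun x => ((cids.count x : Nat) : Int)) ?_ ?_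
        · exact (pv_descRange_pairwise m).imp (fun h => ne_of_gt h)
        · intro x hxu
          have hx := (PySem.Set.mem_ofList cids x).1 hxu
          rw [pv_mem_descRange]
          show 1 ≤ ((cids.count x : Nat) : Int) ∧ ((cids.count x : Nat) : Int) ≤ m
          have h1 := hub x hx
          have h2 := List.count_pos_iff.2 hx
          omega
      · rw [hys, List.flatMap_def]
        refine List.pairwise_flatten.2 ⟨?_, ?_⟩
        · intro b hb
          obtain ⟨c, hcmem, rfl⟩ := List.mem_map.mp hb
          refine ((pv_ofList_pairwise_idxOf cids).sublist List.filter_sublist).imp_of_mem ?_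
          intro a b ha hb hab
          have hac := List.of_mem_filter ha
          have hbc := List.of_mem_filter hb
          rw [beq_iff_eq] at hac hbc
          have ha' : a ∈ cids := (PySem.Set.mem_ofList cids a).1 (List.mem_of_mem_filter ha)
          have hb' : b ∈ cids := (PySem.Set.mem_ofList cids b).1 (List.mem_of_mem_filter hb)
          rw [Prod.Lex.lt_iff]
          refine Or.inr ⟨?_, ?_⟩
          · show -((PySem.Dict.counter cids).getD a 0) = -((PySem.Dict.counter cids).getD b 0)
            rw [PySem.Dict.getD_counter, PySem.Dict.getD_counter, hac, hbc]
          · show ((PySem.List.enumerate cids 0).foldl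
                (fun d p => if !d.contains p.2 then d.insert p.2 p.1 else d)
                (PySem.Dict.empty : PySem.Dict Int Int)).getD a 0
              < ((PySem.List.enumerate cids 0).foldl
                (fun d p => if !d.contains p.2 then d.insert p.2 p.1 else d)
                (PySem.Dict.empty : PySem.Dict Int Int)).getD b 0
            rw [pv_fi_getD cids a ha', pv_fi_getD cids b hb']
            exact_mod_cast hab
        · rw [List.pairwise_map]
          refine (pv_descRange_pairwise m).imp ?_
          intro c1 c2 hlt x hx y hy
          have hxc := List.of_mem_filter hx
          have hyc := List.of_mem_filter hy
          rw [beq_iff_eq] at hxc hyc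
          rw [Prod.Lex.lt_iff]
          refine Or.inl ?_
          show -((PySem.Dict.counter cids).getD x 0) < -((PySem.Dict.counter cids).getD y 0)
          rw [PySem.Dict.getD_counter, PySem.Dict.getD_counter, hxc, hyc]
          omega
    rw [hA, hB]

-- ===== VERDICT (by name: the statement is the Claim_ definition above) =====
theorem sort_by_frequency_spec : Claim_equal_sort_by_frequency :=
  fun cids _ => pv_main cids
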